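-- pv_equiv track=rewrite | github.com/mattevenson/moocha | moocha.py | which_interval
-- ===== SOURCE A (Python) =====
-- import math
--
-- def which_interval(page_num, page_ct):
--     interval_ct = math.ceil(page_ct / 5)
--     intervals = [[(i * 5) + 1, (i * 5) + 6] for i in range(interval_ct)]
--
--     for interval in intervals:
--         if page_num >= interval[0] and page_num < interval[1]:
--             start = interval[0]
--             end = interval[1]
--
--     if page_ct < end:
--         end = page_ct + 1
--
--     return start, end
-- ===== SOURCE B (Python) =====
-- def which_interval(page_num, page_ct):
--     # Direct arithmetic: the interval index is (page_num - 1) // 5; clamp the end to page_ct + 1.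
--     i = (page_num - 1) // 5
--     start = 5 * i + 1
--     end = 5 * i + 6
--     if page_ct < end:
--         end = page_ct + 1
--     return start, end
-- ===== Notes on version B (the rewrite author's own statement) =====
-- stated objective: faster
-- what changed: B replaces A's construction of the full interval list and linear scan with O(1) arithmetic: index = (page_num-1)//5, then start/end from it, clamping end to page_ct+1.
import Mathlib
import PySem

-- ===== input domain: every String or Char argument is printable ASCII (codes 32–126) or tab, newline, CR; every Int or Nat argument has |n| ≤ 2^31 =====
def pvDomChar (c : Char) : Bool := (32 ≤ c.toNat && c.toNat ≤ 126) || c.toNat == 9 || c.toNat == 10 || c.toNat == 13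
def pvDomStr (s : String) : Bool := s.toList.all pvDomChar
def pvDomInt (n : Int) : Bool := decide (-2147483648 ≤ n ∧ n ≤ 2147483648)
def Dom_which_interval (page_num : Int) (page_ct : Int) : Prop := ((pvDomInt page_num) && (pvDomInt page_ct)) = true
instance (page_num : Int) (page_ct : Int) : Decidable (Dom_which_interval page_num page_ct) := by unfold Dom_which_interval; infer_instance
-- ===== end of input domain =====

-- B computes the interval in O(1) arithmetic instead of building the whole interval list and scanning it.

-- ===== PORT A =====
-- math.ceil(page_ct / 5) ported as ceiling division -((-page_ct) // 5); exact on the stated |page_ct| ≤ 2^31 domain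
-- (the float quotient there is never rounded across an integer boundary).
def which_interval (page_num : Int) (page_ct : Int) : List Int :=
  let interval_ct : Int := -(PySem.Int.floordiv (-page_ct) 5)
  let intervals : List (Int × Int) :=
    (PySem.List.pyRange 0 interval_ct 1).map (fun i => (i * 5 + 1, i * 5 + 6))
  let se : Option (Int × Int) := intervals.foldl
    (fun st interval =>
      if page_num ≥ interval.1 ∧ page_num < interval.2 then some interval else st) none
  match se with
  | none => []  -- Python raises NameError here (start/end never assigned); excluded by Pre_
  | some (s, e) => [s, if page_ct < e then page_ct + 1 else e]

-- ===== PORT B =====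
def which_interval_alt (page_num : Int) (page_ct : Int) : List Int :=
  let i : Int := PySem.Int.floordiv (page_num - 1) 5
  let start : Int := 5 * i + 1
  let e : Int := 5 * i + 6
  [start, if page_ct < e then page_ct + 1 else e]

-- ===== PRECONDITION & SPEC =====
-- Pre_ excludes exactly the inputs on which A raises NameError (the loop never assigns start/end):
-- page_num must fall inside one of A's intervals, i.e. 1 ≤ page_num ≤ 5 * ceil(page_ct / 5).
def Pre_which_interval (page_num : Int) (page_ct : Int) : Prop :=
  1 ≤ page_num ∧ page_num ≤ 5 * (-(PySem.Int.floordiv (-page_ct) 5))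
instance (page_num : Int) (page_ct : Int) : Decidable (Pre_which_interval page_num page_ct) := by
  unfold Pre_which_interval; infer_instance

def pvWitness_which_interval : Int × Int := (3, 12)

def Spec_which_interval (page_num : Int) (page_ct : Int) (out : List Int) : Prop := out = which_interval_alt page_num page_ct
instance (page_num : Int) (page_ct : Int) (out : List Int) : Decidable (Spec_which_interval page_num page_ct out) := by unfold Spec_which_interval; infer_instance

-- ===== CLAIM (what is proved, stated in full; the proofs are below) =====
def Claim_equal_which_interval : Prop := ∀ (page_num : Int) (page_ct : Int), Dom_which_interval page_num page_ct → Pre_which_interval page_num page_ct → Spec_which_interval page_num page_ct (which_interval page_num page_ct)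

-- ===== LEMMAS AND PROOFS =====

-- A's scan over the intervals of range a .. a+n keeps the (unique) interval containing p.
theorem pv_fold_find (p q : Int) (hq : q * 5 ≤ p - 1 ∧ p - 1 < q * 5 + 5) :
    ∀ (n : Nat) (a : Int) (st : Option (Int × Int)),
      ((PySem.List.pyRange a (a + n) 1).map (fun i => (i * 5 + 1, i * 5 + 6))).foldl
          (fun st interval =>
            if p ≥ interval.1 ∧ p < interval.2 then some interval else st) st
        = if a ≤ q ∧ q < a + n then some (q * 5 + 1, q * 5 + 6) else st := by
  intro n
  induction n with
  | zero =>
    intro a st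
    rw [PySem.List.pyRange_one_eq_nil (by omega)]
    simp only [List.map_nil, List.foldl_nil]
    rw [if_neg (by omega)]
  | succ k ih =>
    intro a st
    have hb : a + ((k + 1 : Nat) : Int) = a + 1 + (k : Int) := by push_cast; ring
    rw [hb, PySem.List.pyRange_one_cons (by omega)]
    simp only [List.map_cons, List.foldl_cons]
    rw [ih (a + 1)]
    by_cases hqa : q = a
    · subst hqa
      rw [if_neg (by omega), if_pos (by omega), if_pos (by omega)]
    · by_cases hin : a + 1 ≤ q ∧ q < a + 1 + (k : Int)
      · rw [if_pos hin, if_pos (by omega)]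
      · rw [if_neg hin, if_neg (by omega), if_neg (by omega)]

-- ===== VERDICT (by name: the statement is the Claim_ definition above) =====
theorem which_interval_spec : Claim_equal_which_interval := by
  intro p c _ hPre
  obtain ⟨h1, h2⟩ := hPre
  unfold Spec_which_interval
  simp only [which_interval, which_interval_alt]
  have hq := (PySem.Int.floordiv_eq_iff_of_pos (a := p - 1) (b := 5)
    (q := PySem.Int.floordiv (p - 1) 5) (by norm_num)).mp rfl
  have hq' : PySem.Int.floordiv (p - 1) 5 * 5 ≤ p - 1 ∧
      p - 1 < PySem.Int.floordiv (p - 1) 5 * 5 + 5 := by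
    constructor
    · exact hq.1
    · nlinarith [hq.2]
  generalize hg : PySem.Int.floordiv (p - 1) 5 = q at hq' ⊢
  rw [show (-PySem.Int.floordiv (-c) 5 : Int)
        = 0 + (((-PySem.Int.floordiv (-c) 5).toNat : Nat) : Int) by omega]
  rw [pv_fold_find p q hq' _ 0 none]
  rw [if_pos (by omega)]
  simp only []
  rw [show q * 5 + 1 = 5 * q + 1 by ring, show q * 5 + 6 = 5 * q + 6 by ring]
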